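-- pv_equiv track=rewrite | github.com/AtAleDu/HomeWorkPython | Infa7/1.py | insert_books
-- ===== SOURCE A (Python) =====
-- def hash_mid_square(book_title):
--     ascii_sum = sum(ord(char) for char in book_title)
--     return ascii_sum % 100  # Просто ограничим хеш до 2 знаков
--
-- def insert_books(books):
--     hash_table = {}
--     for book_title in books:
--         hash_value = hash_mid_square(book_title)
--         if hash_value not in hash_table:
--             hash_table[hash_value] = [book_title]
--         else:
--             hash_table[hash_value].append(book_title)
--     return hash_table
-- ===== SOURCE B (Python) =====
-- def hash_mid_square(book_title):
--     ascii_sum = sum(ord(char) for char in book_title)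
--     return ascii_sum % 100  # Просто ограничим хеш до 2 знаков
--
-- def insert_books(books):
--     # Two-pass gather: hash every title once, then build each bucket by a
--     # comprehension over the distinct hashes in first-occurrence order.
--     hashes = [hash_mid_square(title) for title in books]
--     return {k: [t for t, h in zip(books, hashes) if h == k]
--             for k in dict.fromkeys(hashes)}
-- ===== Notes on version B (the rewrite author's own statement) =====
-- stated objective: alternative
-- what changed: Replaces A's single-pass dict insert-or-append loop with a two-pass gather: hash every title once, then build each bucket by a comprehension over the distinct hashes in first-occurrence order (dict.fromkeys).
import Mathlib
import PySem

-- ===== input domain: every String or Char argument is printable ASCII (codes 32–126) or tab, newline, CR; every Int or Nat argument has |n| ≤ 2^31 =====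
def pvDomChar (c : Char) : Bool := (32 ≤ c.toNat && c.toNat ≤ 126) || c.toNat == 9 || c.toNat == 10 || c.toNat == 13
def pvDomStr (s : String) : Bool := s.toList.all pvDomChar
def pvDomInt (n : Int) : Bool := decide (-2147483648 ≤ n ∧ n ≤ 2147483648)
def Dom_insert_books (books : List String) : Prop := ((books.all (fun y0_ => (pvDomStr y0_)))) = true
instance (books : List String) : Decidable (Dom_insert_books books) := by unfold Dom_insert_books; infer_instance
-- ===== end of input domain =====

-- B replaces A's single-pass insert-or-append dict loop by a two-pass gather
-- (hash every title once, then one bucket comprehension per distinct hash);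
-- objective: alternative decomposition, not speed.

-- ===== PORT A =====
-- sum(ord(char) for char in book_title) % 100
def hash_mid_square (book_title : String) : Int :=
  PySem.Int.mod (book_title.toList.foldl (fun a c => a + (c.toNat : Int)) 0) 100

def insert_books (books : List String) : List (Int × List String) :=
  (books.foldl
    (fun hash_table book_title =>
      let hash_value := hash_mid_square book_title
      if hash_table.contains hash_value = false then
        hash_table.insert hash_value [book_title]
      else
        hash_table.modify hash_value [] (fun l => l ++ [book_title]))
    (PySem.Dict.empty : PySem.Dict Int (List String))).items

-- ===== PORT B =====
def insert_books_alt (books : List String) : List (Int × List String) :=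
  let hashes := books.map hash_mid_square
  (PySem.List.dedup hashes).map
    (fun k => (k, ((books.zip hashes).filter (fun p => p.2 == k)).map (fun p => p.1)))

-- ===== PRECONDITION & SPEC =====
def Spec_insert_books (books : List String) (out : List (Int × List String)) : Prop := out = insert_books_alt books
instance (books : List String) (out : List (Int × List String)) : Decidable (Spec_insert_books books out) := by unfold Spec_insert_books; infer_instance

-- ===== CLAIM (what is proved, stated in full; the proofs are below) =====
def Claim_equal_insert_books : Prop := ∀ (books : List String), Dom_insert_books books → Spec_insert_books books (insert_books books)

-- ===== LEMMAS AND PROOFS =====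

-- A's if/else step is exactly the grouping modify `d[k] = d.get(k, []) + [t]`.
theorem insert_books_step_eq (d : PySem.Dict Int (List String)) (t : String) :
    (let h := hash_mid_square t;
     if d.contains h = false then d.insert h [t]
     else d.modify h [] (fun l => l ++ [t]))
    = d.modify (hash_mid_square t) [] (fun l => l ++ [t]) := by
  by_cases hc : d.contains (hash_mid_square t) = false
  · simp [PySem.Dict.modify, PySem.Dict.getD_of_not_contains, hc]
  · simp [hc]

theorem insert_books_eq (books : List String) :
    insert_books books = insert_books_alt books := by
  unfold insert_books insert_books_alt
  simp only [insert_books_step_eq]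
  set D := books.foldl
    (fun d t => d.modify (hash_mid_square t) [] (fun l => l ++ [t]))
    (PySem.Dict.empty : PySem.Dict Int (List String)) with hD
  have hnd : D.keys.Nodup := by
    rw [hD]
    exact PySem.Dict.nodup_keys_foldl_modify_key books hash_mid_square [] _ _
      (by simp [PySem.Dict.keys_empty])
  have hkeys : D.keys = PySem.List.dedup (books.map hash_mid_square) := by
    rw [hD, PySem.Dict.keys_foldl_modify_key, PySem.Dict.keys_empty,
      PySem.Set.update_nil_left, PySem.List.dedup_eq_ofList]
  rw [PySem.Dict.items_eq_map_keys D hnd [], hkeys]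
  apply List.map_congr_left
  intro k _
  have hfold : D = (books.map (fun t => (hash_mid_square t, t))).foldl
      (fun d p => d.modify p.1 [] (fun l => l ++ [p.2])) PySem.Dict.empty := by
    rw [hD, List.foldl_map]
  have hg : D.getD k [] =
      (books.filter (fun t => hash_mid_square t == k)).map id := by
    rw [hfold, PySem.Dict.getD_foldl_modify_append, PySem.Dict.getD_empty,
      List.nil_append, List.filter_map, List.map_map]
    rfl
  have hz : books.zip (books.map hash_mid_square)
      = books.map (fun t => (t, hash_mid_square t)) := by
    simpa using (List.zip_map' (f := id) (g := hash_mid_square) (l := books))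
  rw [hg, hz, List.filter_map, List.map_map]
  simp [Function.comp_def]

-- ===== VERDICT (by name: the statement is the Claim_ definition above) =====
theorem insert_books_spec : Claim_equal_insert_books := by
  intro books _
  unfold Spec_insert_books
  exact insert_books_eq books
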